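-- pv_equiv track=rewrite | github.com/Keno-00/MHRQI | utils.py | compose_rc
-- ===== SOURCE A (Python) =====
-- def compose_rc(hcv, d=2):
--
--     if len(hcv) % 2 != 0:
--         raise ValueError("hcv length must be even (pairs of qy,qx).")
--
--     qy_digits = hcv[0::2]
--     qx_digits = hcv[1::2]
--
--     r = 0
--     c = 0
--     for digit in qy_digits:
--         if not (0 <= digit < d):
--             raise ValueError("qy digit out of range for given d.")
--         r = r * d + int(digit)
--
--     for digit in qx_digits:
--         if not (0 <= digit < d):
--             raise ValueError("qx digit out of range for given d.")
--         c = c * d + int(digit)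
--
--     return r, c
-- ===== SOURCE B (Python) =====
-- def _place_value(digits, d):
--     # positional-weight sum, walking the digits back-to-front
--     value = 0
--     weight = 1
--     for digit in reversed(digits):
--         value += int(digit) * weight
--         weight *= d
--     return value
--
--
-- def compose_rc(hcv, d=2):
--
--     if len(hcv) % 2 != 0:
--         raise ValueError("hcv length must be even (pairs of qy,qx).")
--
--     qy_digits = hcv[0::2]
--     qx_digits = hcv[1::2]
--
--     # validation pass, separate from value construction
--     for digit in qy_digits:
--         if not (0 <= digit < d):
--             raise ValueError("qy digit out of range for given d.")
--     for digit in qx_digits: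
--         if not (0 <= digit < d):
--             raise ValueError("qx digit out of range for given d.")
--
--     return _place_value(qy_digits, d), _place_value(qx_digits, d)
-- ===== Notes on version B (the rewrite author's own statement) =====
-- stated objective: alternative
-- what changed: Validation is separated from value construction, and each value is built as a positional-weight sum walking the reversed digit list with a running weight *= d, instead of A's interleaved check-and-Horner left-to-right accumulator.
import Mathlib
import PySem

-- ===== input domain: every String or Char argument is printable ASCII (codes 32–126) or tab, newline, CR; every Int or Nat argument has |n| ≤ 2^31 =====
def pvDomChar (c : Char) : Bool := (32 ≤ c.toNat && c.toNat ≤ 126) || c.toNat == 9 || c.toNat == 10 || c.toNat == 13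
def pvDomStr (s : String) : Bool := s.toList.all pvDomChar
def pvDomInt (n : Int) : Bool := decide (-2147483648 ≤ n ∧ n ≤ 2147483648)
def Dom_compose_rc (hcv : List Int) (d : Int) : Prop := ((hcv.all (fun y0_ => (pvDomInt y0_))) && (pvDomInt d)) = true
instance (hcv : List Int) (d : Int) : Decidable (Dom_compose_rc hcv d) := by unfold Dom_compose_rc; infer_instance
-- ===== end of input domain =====

-- B separates validation from value construction and builds each value as a
-- positional-weight sum over the reversed digits instead of A's Horner accumulator.


-- ===== PORT A =====
-- A's loop: check each digit and Horner-accumulate; 'none' = the ValueError raise.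
def pvLoopA (d : Int) (acc : Int) : List Int → Option Int
  | [] => some acc
  | digit :: rest =>
      if 0 ≤ digit ∧ digit < d then pvLoopA d (acc * d + digit) rest else none

def compose_rc (hcv : List Int) (d : Int) : Int × Int :=
  if hcv.length % 2 ≠ 0 then (0, 0)  -- raise ValueError (excluded by Pre_)
  else
    let qy_digits := (PySem.List.slice? hcv (some 0) none 2).getD []  -- hcv[0::2], step 2 ≠ 0 so some
    let qx_digits := (PySem.List.slice? hcv (some 1) none 2).getD []  -- hcv[1::2]
    match pvLoopA d 0 qy_digits, pvLoopA d 0 qx_digits with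
    | some r, some c => (r, c)
    | _, _ => (0, 0)  -- raise ValueError (excluded by Pre_)

-- ===== PORT B =====
-- validation pass: True iff every digit is in [0, d)  (the raise loop in Source B)
def pvValid (d : Int) (digits : List Int) : Bool :=
  digits.all (fun digit => decide (0 ≤ digit) && decide (digit < d))

-- _place_value: walk reversed digits with running (value, weight)
def pvPlaceValue (digits : List Int) (d : Int) : Int :=
  (digits.reverse.foldl (fun p digit => (p.1 + digit * p.2, p.2 * d)) ((0 : Int), (1 : Int))).1

def compose_rc_alt (hcv : List Int) (d : Int) : Int × Int :=
  if hcv.length % 2 ≠ 0 then (0, 0)  -- raise ValueError (excluded by Pre_)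
  else
    let qy_digits := (PySem.List.slice? hcv (some 0) none 2).getD []
    let qx_digits := (PySem.List.slice? hcv (some 1) none 2).getD []
    if ¬ pvValid d qy_digits then (0, 0)       -- raise (excluded by Pre_)
    else if ¬ pvValid d qx_digits then (0, 0)  -- raise (excluded by Pre_)
    else (pvPlaceValue qy_digits d, pvPlaceValue qx_digits d)

-- ===== PRECONDITION & SPEC =====
-- Pre_: exactly the inputs where the Python A returns (even length, all digits in [0,d)).
def Pre_compose_rc (hcv : List Int) (d : Int) : Prop :=
  hcv.length % 2 = 0 ∧ ∀ x ∈ hcv, 0 ≤ x ∧ x < d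

instance (hcv : List Int) (d : Int) : Decidable (Pre_compose_rc hcv d) := by
  unfold Pre_compose_rc; infer_instance

def pvWitness_compose_rc : List Int × Int := ([1, 0, 0, 1], 2)

def Spec_compose_rc (hcv : List Int) (d : Int) (out : Int × Int) : Prop := out = compose_rc_alt hcv d
instance (hcv : List Int) (d : Int) (out : Int × Int) : Decidable (Spec_compose_rc hcv d out) := by unfold Spec_compose_rc; infer_instance

-- ===== CLAIM (what is proved, stated in full; the proofs are below) =====
def Claim_equal_compose_rc : Prop := ∀ (hcv : List Int) (d : Int), Dom_compose_rc hcv d → Pre_compose_rc hcv d → Spec_compose_rc hcv d (compose_rc hcv d)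

-- ===== LEMMAS AND PROOFS =====

-- Horner with a general accumulator.
lemma horner_shift (d : Int) (xs : List Int) : ∀ a : Int,
    xs.foldl (fun r t => r * d + t) a
      = a * d ^ xs.length + xs.foldl (fun r t => r * d + t) 0 := by
  induction xs with
  | nil => intro a; simp
  | cons t ts ih =>
      intro a
      simp only [List.foldl_cons, List.length_cons]
      rw [ih (a * d + t), ih (0 * d + t)]
      ring

-- A's loop equals: all-valid check, then Horner value.
lemma loopA_eq (d : Int) (xs : List Int) : ∀ a : Int,
    pvLoopA d a xs
      = if pvValid d xs then some (xs.foldl (fun r t => r * d + t) a) else none := by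
  induction xs with
  | nil => intro a; simp [pvLoopA, pvValid]
  | cons t ts ih =>
      intro a
      simp only [pvLoopA, pvValid, List.all_cons, List.foldl_cons]
      by_cases h : 0 ≤ t ∧ t < d
      · simp [h, ih (a * d + t), pvValid]
      · have hb : (decide (0 ≤ t) && decide (t < d)) = false := by
          rcases Decidable.not_and_iff_or_not.mp h with h1 | h1 <;> simp [h1]
        simp [hb]
        intro h1 h2
        exact absurd ⟨h1, h2⟩ h

-- B's reversed walk computes (Horner value, d ^ length).
lemma placeValue_pair (d : Int) (xs : List Int) :
    xs.reverse.foldl (fun p digit => (p.1 + digit * p.2, p.2 * d)) ((0 : Int), (1 : Int))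
      = (xs.foldl (fun r t => r * d + t) 0, d ^ xs.length) := by
  induction xs with
  | nil => simp
  | cons t ts ih =>
      simp only [List.reverse_cons, List.foldl_append, ih, List.foldl_cons, List.foldl_nil,
        List.length_cons]
      rw [horner_shift d ts (0 * d + t), Prod.mk.injEq]
      constructor <;> ring

lemma placeValue_eq (d : Int) (xs : List Int) :
    pvPlaceValue xs d = xs.foldl (fun r t => r * d + t) 0 := by
  unfold pvPlaceValue; rw [placeValue_pair]

-- the two ports agree on EVERY input (both map each Python raise to (0,0))
lemma ports_agree (hcv : List Int) (d : Int) : compose_rc hcv d = compose_rc_alt hcv d := by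
  unfold compose_rc compose_rc_alt
  by_cases hlen : hcv.length % 2 ≠ 0
  · simp [hlen]
  · simp only [hlen, if_false]
    rw [loopA_eq, loopA_eq]
    by_cases hy : pvValid d ((PySem.List.slice? hcv (some 0) none 2).getD [])
    · by_cases hx : pvValid d ((PySem.List.slice? hcv (some 1) none 2).getD [])
      · simp [hy, hx, placeValue_eq]
      · simp [hy, hx]
    · simp [hy]

-- ===== VERDICT (by name: the statement is the Claim_ definition above) =====
theorem compose_rc_spec : Claim_equal_compose_rc := by
  intro hcv d _ _
  unfold Spec_compose_rc
  exact ports_agree hcv d
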